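-- pv_equiv track=rewrite | github.com/inwk6312winter2019/openbookfinal-95raghu | task1a_1.py | opening_file
-- ===== SOURCE A (Python) =====
-- import string
--
-- def the_punctuation(line):
--     for e in string.punctuation:
--              if e in line:
--                   line=line.replace(e," ")
--     return line
--
-- def count_the_article(l):
-- 	mylist=["a","the","at","run","to","and","or","for","an","this"]
-- 	c=0
-- 	for word in l:
-- 		if word in mylist:
-- 			c=c+1
-- 		else:
-- 			pass
-- 	return c
--
-- def opening_file(myfile):
--    b=0
--    l1=[]
--    for line in myfile:
--        line=line.strip(string.whitespace+string.punctuation)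
--        line=the_punctuation(line)
--        for word in line.split():
--            l1.append(word.lower())
--        #b=unique_words(list1)
--        d=count_the_article(l1)
--    return d
-- ===== SOURCE B (Python) =====
-- import string
--
-- def the_punctuation(line):
--     for e in string.punctuation:
--              if e in line:
--                   line=line.replace(e," ")
--     return line
--
-- def opening_file(myfile):
--     words = []
--     for line in myfile:
--         line = line.strip(string.whitespace + string.punctuation)
--         line = the_punctuation(line)
--         words.extend(w.lower() for w in line.split())
--     counts = {}
--     for w in words:
--         counts[w] = counts.get(w, 0) + 1
--     return sum(counts.get(w, 0)
--                for w in ["a", "the", "at", "run", "to", "and", "or", "for", "an", "this"])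
-- ===== Notes on version B (the rewrite author's own statement) =====
-- stated objective: faster
-- what changed: B accumulates all words in one pass and counts once at the end via a hand-built counter dict summed over the fixed 10-word article list, instead of A's per-line full recount that scans the article list for every accumulated word so far.
-- outside the precondition, e.g. on opening_file([]): A raises UnboundLocalError, B returns 0
-- crash fix: On the empty file list A raises UnboundLocalError (d is never assigned); B returns 0. — e.g. on opening_file([]): A raises UnboundLocalError, B returns 0
import Mathlib
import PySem

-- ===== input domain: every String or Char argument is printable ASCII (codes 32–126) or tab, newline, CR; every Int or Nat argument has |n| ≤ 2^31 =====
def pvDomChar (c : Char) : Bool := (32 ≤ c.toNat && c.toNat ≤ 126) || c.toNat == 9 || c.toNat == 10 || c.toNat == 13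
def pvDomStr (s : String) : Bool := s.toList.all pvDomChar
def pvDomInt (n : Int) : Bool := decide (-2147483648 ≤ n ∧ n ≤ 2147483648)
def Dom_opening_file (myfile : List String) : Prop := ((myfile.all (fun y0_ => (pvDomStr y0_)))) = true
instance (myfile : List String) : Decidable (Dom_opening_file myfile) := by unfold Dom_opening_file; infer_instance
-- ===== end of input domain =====

-- B replaces A's per-line full recount (membership scan of the article list per word) by a single
-- counting pass over the accumulated words plus ten dict lookups; return value only, same result.

-- ===== PORT A =====
-- string.punctuation, as a list of single-character strings (the loop variable e)
def pvPunct : List String := ["!", "\"", "#", "$", "%", "&", "'", "(", ")", "*", "+", ",", "-", ".", "/", ":", ";", "<", "=", ">", "?", "@", "[", "\\", "]", "^", "_", "`", "{", "|", "}", "~"]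

-- string.whitespace + string.punctuation (argument of line.strip)
def pvStripSet : String := " \t\n\r\x0b\x0c!\"#$%&'()*+,-./:;<=>?@[\\]^_`{|}~"

def the_punctuation (line : String) : String :=
  pvPunct.foldl (fun line e => if PySem.Str.isIn e line then PySem.Str.replace line e " " else line) line

def pvMylist : List String := ["a", "the", "at", "run", "to", "and", "or", "for", "an", "this"]

def count_the_article (l : List String) : Int :=
  l.foldl (fun c word => if word ∈ pvMylist then c + 1 else c) 0

def opening_file (myfile : List String) : Int :=
  let st : List String × Option Int := myfile.foldl
    (fun st line =>
      let line := PySem.Str.stripChars line pvStripSet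
      let line := the_punctuation line
      let l1 := (PySem.Str.split₀ line).foldl (fun l1 word => l1 ++ [PySem.Str.lower word]) st.1
      (l1, some (count_the_article l1)))
    ([], none)
  st.2.getD 0   -- none only for the empty file, where Python raises UnboundLocalError (outside Pre_)

-- ===== PORT B =====
def pvArticleWords : List String := ["a", "the", "at", "run", "to", "and", "or", "for", "an", "this"]

def opening_file_alt (myfile : List String) : Int :=
  let words : List String := myfile.foldl
    (fun ws line =>
      ws ++ (PySem.Str.split₀ (the_punctuation (PySem.Str.stripChars line pvStripSet))).map PySem.Str.lower)
    []
  let counts : PySem.Dict String Int :=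
    words.foldl (fun d w => d.insert w (d.getD w 0 + 1)) PySem.Dict.empty
  pvArticleWords.foldl (fun s w => s + counts.getD w 0) 0

-- ===== PRECONDITION & SPEC =====
-- Pre_ excludes only the empty file list, on which Python A raises UnboundLocalError (d never assigned).
def Pre_opening_file (myfile : List String) : Prop := myfile ≠ []
instance (myfile : List String) : Decidable (Pre_opening_file myfile) := by unfold Pre_opening_file; infer_instance
def pvWitness_opening_file : List String := (["The cat ran to a tree."])

-- On the empty list A raises UnboundLocalError; B returns 0.
def Raises_opening_file (myfile : List String) : Prop := myfile = []
instance (myfile : List String) : Decidable (Raises_opening_file myfile) := by unfold Raises_opening_file; infer_instance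
def pvRaiseWitness_opening_file : List String := ([])
def pvRaiseWitnessOut_opening_file : Int := 0

def Spec_opening_file (myfile : List String) (out : Int) : Prop := out = opening_file_alt myfile
instance (myfile : List String) (out : Int) : Decidable (Spec_opening_file myfile out) := by unfold Spec_opening_file; infer_instance

-- ===== CLAIM (what is proved, stated in full; the proofs are below) =====
def Claim_equal_opening_file : Prop := ∀ (myfile : List String), Dom_opening_file myfile → Pre_opening_file myfile → Spec_opening_file myfile (opening_file myfile)
def Claim_raises_opening_file : Prop := (∀ (myfile : List String), Dom_opening_file myfile → Raises_opening_file myfile → ¬ Pre_opening_file myfile) ∧ (Dom_opening_file (pvRaiseWitness_opening_file) ∧ Raises_opening_file (pvRaiseWitness_opening_file) ∧ opening_file_alt (pvRaiseWitness_opening_file) = pvRaiseWitnessOut_opening_file)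

-- ===== LEMMAS AND PROOFS =====

-- the per-line word pipeline shared (as a value) by both ports
def pvWordsOf (line : String) : List String :=
  (PySem.Str.split₀ (the_punctuation (PySem.Str.stripChars line pvStripSet))).map PySem.Str.lower

-- indicator sum over a duplicate-free list
theorem pv_sum_indicator (x : String) :
    ∀ (al : List String), al.Nodup →
      ((al.map (fun w => if x = w then (1 : Int) else 0)).sum) = (if x ∈ al then 1 else 0) := by
  intro al
  induction al with
  | nil => simp
  | cons a as ih =>
    intro h
    rcases List.nodup_cons.mp h with ⟨ha, has⟩
    by_cases hx : x = a
    · subst hx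
      simp [ih has, ha]
    · simp [hx, ih has]

-- count_the_article equals the (Int) sum of per-article-word counts
theorem pv_count_eq_sum (l : List String) :
    count_the_article l = (pvMylist.map (fun w => (l.count w : Int))).sum := by
  have key : ∀ (l : List String) (c : Int),
      l.foldl (fun c word => if word ∈ pvMylist then c + 1 else c) c
        = c + (pvMylist.map (fun w => (l.count w : Int))).sum := by
    intro l
    induction l with
    | nil => intro c; simp
    | cons x l ih =>
      intro c
      have hstep : (pvMylist.map (fun w => ((x :: l).count w : Int))).sum
          = (pvMylist.map (fun w => (l.count w : Int))).sum
            + (if x ∈ pvMylist then (1 : Int) else 0) := by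
        have h1 : (pvMylist.map (fun w => ((x :: l).count w : Int)))
            = (pvMylist.map (fun w => (l.count w : Int) + (if x = w then 1 else 0))) := by
          apply List.map_congr_left
          intro w _
          by_cases hxw : x = w <;> simp [hxw]
        rw [h1, List.sum_map_add, pv_sum_indicator x pvMylist (by decide)]
      simp only [List.foldl_cons]
      by_cases hx : x ∈ pvMylist
      · rw [ih (if x ∈ pvMylist then c + 1 else c), hstep]; simp [hx]; ring
      · rw [ih (if x ∈ pvMylist then c + 1 else c), hstep]; simp [hx]
  simpa using key l 0

-- A's per-line inner word loop is an append of the mapped split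
theorem pv_inner_loop (line : String) (acc : List String) :
    (PySem.Str.split₀ (the_punctuation (PySem.Str.stripChars line pvStripSet))).foldl
        (fun l1 word => l1 ++ [PySem.Str.lower word]) acc
      = acc ++ pvWordsOf line := by
  rw [PySem.List.foldl_append_singleton_eq_map]; rfl

-- A's outer fold (body already rewritten by pv_inner_loop): accumulated words and the last recount
theorem pv_foldA (l : List String) : ∀ (acc : List String) (d : Option Int), l ≠ [] →
    l.foldl (fun st line => (st.1 ++ pvWordsOf line, some (count_the_article (st.1 ++ pvWordsOf line))))
      (acc, d)
      = (acc ++ l.flatMap pvWordsOf, some (count_the_article (acc ++ l.flatMap pvWordsOf))) := by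
  induction l with
  | nil => intro _ _ h; exact absurd rfl h
  | cons x t ih =>
    intro acc d _
    simp only [List.foldl_cons]
    cases t with
    | nil => simp
    | cons y s =>
      rw [ih _ _ (by simp)]
      simp [List.append_assoc]

-- B's counting loop is PySem's counter; its lookups are list counts
theorem pv_counts_getD (words : List String) (w : String) :
    (words.foldl (fun d w => d.insert w (d.getD w 0 + 1)) PySem.Dict.empty).getD w 0
      = (words.count w : Int) := by
  rw [PySem.Dict.foldl_insert_getD_add_one_eq_counter, PySem.Dict.getD_counter]

-- ===== VERDICT (by name: the statement is the Claim_ definition above) =====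
theorem opening_file_spec : Claim_equal_opening_file := by
  intro myfile _ hpre
  unfold Spec_opening_file opening_file opening_file_alt
  simp only [pv_inner_loop]
  rw [pv_foldA myfile [] none hpre]
  rw [PySem.List.foldl_append_eq_flatMap]
  simp only [List.nil_append, Option.getD_some]
  rw [pv_count_eq_sum, PySem.List.foldl_add]
  have : pvArticleWords = pvMylist := rfl
  rw [this]
  simp only [Int.zero_add]
  congr 1
  apply List.map_congr_left
  intro w _
  exact (pv_counts_getD _ w).symm

@[simp] theorem opening_file_raises : Claim_raises_opening_file := by
  unfold Claim_raises_opening_file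
  exact ⟨fun m _ hr hp => hp hr, by decide⟩
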